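-- pv_equiv track=rewrite | github.com/tonybnya/fcc-daily-coding-challenge | fcc_079_100_characters.py | one_hundred
-- ===== SOURCE A (Python) =====
-- def one_hundred(chars: str) -> str:
--     length: int = len(chars)
--     characters: str = ""
--     repeat: int = 100 // length
--     for i in range(repeat):
--         characters += chars
--     quotient: int = 100 // length
--     remain_chars: int = 100 - (length * quotient)
--     characters += chars[:remain_chars]
--     return characters
-- ===== SOURCE B (Python) =====
-- def one_hundred(chars: str) -> str:
--     # overshoot by one full copy, then trim to exactly 100 characters;
--     # keeps 100 // len(chars) so the empty string still raises ZeroDivisionError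
--     return (chars * (100 // len(chars) + 1))[:100]
-- ===== Notes on version B (the rewrite author's own statement) =====
-- stated objective: idiomatic
-- what changed: Replaces the quotient loop plus remainder-slice assembly with one closed-form expression: repeat the string one copy past 100 characters and slice to 100.
import Mathlib
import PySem

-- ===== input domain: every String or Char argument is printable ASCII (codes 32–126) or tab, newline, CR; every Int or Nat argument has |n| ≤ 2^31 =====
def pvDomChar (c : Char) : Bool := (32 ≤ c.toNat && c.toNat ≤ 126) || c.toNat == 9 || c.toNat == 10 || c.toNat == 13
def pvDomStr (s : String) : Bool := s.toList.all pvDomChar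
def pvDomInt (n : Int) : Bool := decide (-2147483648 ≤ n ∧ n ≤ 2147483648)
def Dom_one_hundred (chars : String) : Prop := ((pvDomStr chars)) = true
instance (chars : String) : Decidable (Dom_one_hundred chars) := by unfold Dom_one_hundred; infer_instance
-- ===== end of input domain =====

-- B replaces A's quotient-loop-plus-remainder assembly by one closed-form
-- "overshoot by one copy and slice to 100" expression (idiomatic, same cost).


-- ===== PORT A =====
def one_hundred (chars : String) : String :=
  let cs : List Char := chars.toList
  let length : Int := PySem.List.len cs
  let rpt : Int := PySem.Int.floordiv 100 length
  let characters : List Char :=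
    (PySem.List.pyRange 0 rpt 1).foldl (fun acc _ => acc ++ cs) []
  let quotient : Int := PySem.Int.floordiv 100 length
  let remain : Int := 100 - length * quotient
  String.ofList (characters ++ PySem.List.slice cs none (some remain))

-- ===== PORT B =====
def one_hundred_alt (chars : String) : String :=
  let cs : List Char := chars.toList
  String.ofList
    (PySem.List.slice
      (PySem.List.pyRepeat cs (PySem.Int.floordiv 100 (PySem.List.len cs) + 1))
      none (some 100))

-- ===== PRECONDITION & SPEC =====
-- Pre_ excludes only the empty string, on which both A and B raise ZeroDivisionError (100 // 0).
def Pre_one_hundred (chars : String) : Prop := chars ≠ ""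
instance (chars : String) : Decidable (Pre_one_hundred chars) := by unfold Pre_one_hundred; infer_instance
def pvWitness_one_hundred : String := "ab"

def Spec_one_hundred (chars : String) (out : String) : Prop := out = one_hundred_alt chars
instance (chars : String) (out : String) : Decidable (Spec_one_hundred chars out) := by unfold Spec_one_hundred; infer_instance

-- ===== CLAIM (what is proved, stated in full; the proofs are below) =====
def Claim_equal_one_hundred : Prop := ∀ (chars : String), Dom_one_hundred chars → Pre_one_hundred chars → Spec_one_hundred chars (one_hundred chars)

-- ===== LEMMAS AND PROOFS =====

-- A's loop `for i in range(r): characters += chars` appends one copy per iteration.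
lemma foldl_append_const {α β : Type} (cs : List α) (l : List β) (init : List α) :
    l.foldl (fun acc _ => acc ++ cs) init = init ++ (List.replicate l.length cs).flatten := by
  induction l generalizing init with
  | nil => simp
  | cons x xs ih => simp [List.foldl_cons, ih, List.replicate_succ, List.append_assoc]

-- Taking q full copies plus r ≤ |cs| characters out of q+1 copies.
lemma take_flatten_replicate {α : Type} (cs : List α) (q r : Nat) (hr : r ≤ cs.length) :
    ((List.replicate (q + 1) cs).flatten).take (cs.length * q + r) =
    (List.replicate q cs).flatten ++ cs.take r := by
  induction q with
  | zero => simp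
  | succ q ih =>
      have h1 : List.replicate (q + 1 + 1) cs = cs :: List.replicate (q + 1) cs := rfl
      calc ((List.replicate (q + 1 + 1) cs).flatten).take (cs.length * (q + 1) + r)
          = (cs ++ (List.replicate (q + 1) cs).flatten).take
              (cs.length + (cs.length * q + r)) := by
            rw [h1, List.flatten_cons]; ring_nf
        _ = cs ++ ((List.replicate (q + 1) cs).flatten).take (cs.length * q + r) :=
            List.take_length_add_append _
        _ = cs ++ ((List.replicate q cs).flatten ++ cs.take r) := by rw [ih]
        _ = (List.replicate (q + 1) cs).flatten ++ cs.take r := by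
            simp [List.replicate_succ, List.flatten_cons]

-- ===== VERDICT (by name: the statement is the Claim_ definition above) =====
theorem one_hundred_spec : Claim_equal_one_hundred := by
  intro chars _ hpre
  unfold Spec_one_hundred one_hundred one_hundred_alt
  dsimp only
  set cs := chars.toList with hcs
  have hne : cs ≠ [] := by
    rw [hcs]; simp [String.toList_eq_nil_iff]
    exact fun h => hpre h
  have hL : 0 < cs.length := List.length_pos_iff.mpr hne
  set L : Nat := cs.length with hLdef
  set q : Nat := 100 / L with hq
  set r : Nat := 100 % L with hr
  have hqr : L * q + r = 100 := by rw [hq, hr]; exact Nat.div_add_mod 100 L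
  have hrL : r < L := by rw [hr]; exact Nat.mod_lt 100 hL
  have hfd : PySem.Int.floordiv 100 (PySem.List.len cs) = (q : Int) := by
    have h := PySem.Int.floordiv_natCast 100 L
    rw [PySem.List.len_eq, ← hLdef, hq]
    exact_mod_cast h
  rw [hfd]
  -- A's loop
  rw [foldl_append_const]
  have hlen : (PySem.List.pyRange 0 ((q : Int)) 1).length = q := by
    simpa using congrArg List.length (PySem.List.pyRange_zero_natCast q)
  rw [hlen]
  -- A's remainder slice
  have hremain : (100 : Int) - (PySem.List.len cs) * (q : Int) = ((r : Nat) : Int) := by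
    rw [PySem.List.len_eq, ← hLdef]; omega
  rw [hremain, PySem.List.slice_to_natCast]
  -- B's side
  have hrep : PySem.List.pyRepeat cs ((q : Int) + 1) = (List.replicate (q + 1) cs).flatten := by
    have ht : ((q : Int) + 1).toNat = q + 1 := by omega
    simp [PySem.List.pyRepeat, ht]
  rw [hrep]
  have h100 : PySem.List.slice ((List.replicate (q + 1) cs).flatten) none (some (100 : Int))
      = ((List.replicate (q + 1) cs).flatten).take 100 := by
    have := PySem.List.slice_to_natCast ((List.replicate (q + 1) cs).flatten) (b := 100)
    exact_mod_cast this
  rw [h100]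
  have htake := take_flatten_replicate cs q r (le_of_lt hrL)
  rw [← hLdef] at htake
  rw [hqr] at htake
  rw [htake]
  simp
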